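-- pv_equiv track=rewrite | github.com/pandari260/Tesis-Classification | SVM/GeneradorMuestras.py | generarCovarianzas
-- ===== SOURCE A (Python) =====
-- def generarCovarianzas(v,d):
--     cov, cov_i = [], []
--     for i in range(d):
--         for j in range(d):
--             if i==j:
--                 cov_i.append(v)
--             else:
--                 cov_i.append(0)
--         cov.append(cov_i)
--         cov_i = []
--     return cov
-- ===== SOURCE B (Python) =====
-- def generarCovarianzas(v, d):
--     # Build one prototype row [v,0,...,0] and obtain every subsequent row by
--     # rotating it right one step, so v walks down the diagonal; no per-cell
--     # decisions and no index assignment.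
--     if d <= 0:
--         return []
--     row = [v] + [0] * (d - 1)
--     cov = []
--     for _ in range(d):
--         cov.append(row)
--         row = [row[-1]] + row[:-1]
--     return cov
-- ===== Notes on version B (the rewrite author's own statement) =====
-- stated objective: alternative
-- what changed: Instead of deciding each cell with an i==j branch inside a nested loop, B builds one prototype row [v,0,...,0] and produces each subsequent row by rotating the previous row right by one position, so v walks down the diagonal.
import Mathlib
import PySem

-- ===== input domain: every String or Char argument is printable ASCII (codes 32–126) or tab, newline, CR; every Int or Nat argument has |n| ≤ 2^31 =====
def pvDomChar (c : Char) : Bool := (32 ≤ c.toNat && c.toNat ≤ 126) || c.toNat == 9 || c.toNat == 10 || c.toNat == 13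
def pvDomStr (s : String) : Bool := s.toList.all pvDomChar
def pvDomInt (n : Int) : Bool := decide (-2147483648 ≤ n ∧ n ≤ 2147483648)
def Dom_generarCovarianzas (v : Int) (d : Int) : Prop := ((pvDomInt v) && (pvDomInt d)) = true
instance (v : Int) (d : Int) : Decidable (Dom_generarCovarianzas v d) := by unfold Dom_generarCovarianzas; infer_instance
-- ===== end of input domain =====

-- B replaces A's nested loop with an i==j branch per cell by a single prototype row
-- [v,0,...,0] rotated right once per row, so v walks down the diagonal (objective: alternative).

-- ===== PORT A =====
-- loop state: (cov, cov_i); cov_i is rebuilt by the inner j-loop each iteration and reset to []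
def generarCovarianzas (v : Int) (d : Int) : List (List Int) :=
  ((PySem.List.pyRange 0 d 1).foldl
    (fun (st : List (List Int) × List Int) i =>
      let cov_i := (PySem.List.pyRange 0 d 1).foldl
        (fun acc j => acc ++ [if i == j then v else 0]) st.2
      (st.1 ++ [cov_i], []))
    ([], [])).1

-- ===== PORT B =====
-- row = [row[-1]] + row[:-1]  (row[-1] via pyGet?_neg_one↦getLast?; never none inside the
-- loop since the loop only runs when d > 0 and row is nonempty)
def pvRot (r : List Int) : List Int :=
  r.getLast?.getD 0 :: PySem.List.slice r none (some (-1))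

def generarCovarianzas_alt (v : Int) (d : Int) : List (List Int) :=
  if d ≤ 0 then []
  else
    ((PySem.List.pyRange 0 d 1).foldl
      (fun (st : List (List Int) × List Int) _ => (st.1 ++ [st.2], pvRot st.2))
      ([], v :: List.replicate (d - 1).toNat 0)).1

-- ===== PRECONDITION & SPEC =====
def Spec_generarCovarianzas (v : Int) (d : Int) (out : List (List Int)) : Prop := out = generarCovarianzas_alt v d
instance (v : Int) (d : Int) (out : List (List Int)) : Decidable (Spec_generarCovarianzas v d out) := by unfold Spec_generarCovarianzas; infer_instance

-- ===== CLAIM (what is proved, stated in full; the proofs are below) =====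
def Claim_equal_generarCovarianzas : Prop := ∀ (v : Int) (d : Int), Dom_generarCovarianzas v d → Spec_generarCovarianzas v d (generarCovarianzas v d)

-- ===== LEMMAS AND PROOFS =====

-- the row with v at position k and 0 elsewhere
def pvE (v : Int) (n k : Nat) : List Int := (List.replicate n 0).set k v

theorem pvE_length (v : Int) (n k : Nat) : (pvE v n k).length = n := by
  simp [pvE]

-- rotating the unit row moves v one step down the diagonal
theorem pv_rot_e (v : Int) (n k : Nat) (h : k + 1 < n) :
    pvRot (pvE v n k) = pvE v n (k + 1) := by
  have hlast : (pvE v n k).getLast? = some 0 := by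
    rw [List.getLast?_eq_getElem?, pvE_length,
      List.getElem?_eq_getElem (by rw [pvE_length]; omega)]
    simp only [pvE]
    rw [List.getElem_set_ne (by omega)]
    simp
  unfold pvRot
  rw [PySem.List.slice_to_neg_one]
  apply List.ext_getElem
  · simp only [List.length_cons, List.length_dropLast, pvE_length]; omega
  · intro m h1 h2
    rcases m with _ | m
    · rw [List.getElem_cons_zero, hlast]
      simp only [Option.getD_some, pvE]
      rw [List.getElem_set_ne (by omega)]
      simp
    · simp only [List.getElem_cons_succ, List.getElem_dropLast, pvE]
      by_cases hk : k = m
      · subst hk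
        rw [List.getElem_set_self (by simp; omega), List.getElem_set_self (by simp; omega)]
      · rw [List.getElem_set_ne hk, List.getElem_set_ne (by omega)]
        simp

-- k rotations of the initial row give the k-th diagonal row
theorem pv_iter_e (v : Int) (n : Nat) : ∀ k, k < n → pvRot^[k] (pvE v n 0) = pvE v n k := by
  intro k
  induction k with
  | zero => intro _; rfl
  | succ k ih =>
    intro h
    rw [Function.iterate_succ_apply', ih (by omega), pv_rot_e v n k (by omega)]

-- B's loop: each iteration emits the current row and rotates it
theorem pv_foldB {α : Type} (l : List α) (c : List (List Int)) (r : List Int) :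
    ((l.foldl (fun (st : List (List Int) × List Int) _ => (st.1 ++ [st.2], pvRot st.2)) (c, r)).1)
      = c ++ (List.range l.length).map (fun k => pvRot^[k] r) := by
  induction l generalizing c r with
  | nil => simp
  | cons a t ih =>
    simp only [List.foldl_cons, List.length_cons, List.range_succ_eq_map, List.map_cons,
      Function.iterate_zero_apply]
    rw [ih]
    have hc : ((fun k => pvRot^[k] r) ∘ Nat.succ) = fun k => pvRot^[k] (pvRot r) := by
      funext k; simp [Function.iterate_succ_apply]
    rw [List.map_map, hc]
    simp

-- a fold that only appends a function of the element is a map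
theorem pv_foldl_append_map {α β : Type} (l : List α) (g : α → β) (init : List β) :
    l.foldl (fun acc x => acc ++ [g x]) init = init ++ l.map g := by
  induction l generalizing init with
  | nil => simp
  | cons a t ih => simp [List.foldl_cons, ih]

-- A's inner loop, started from [], produces the k-th diagonal row
theorem pv_row_eq (v d i : Int) (h0 : 0 ≤ i) (hd : i < d) :
    (PySem.List.pyRange 0 d 1).foldl (fun acc j => acc ++ [if i == j then v else 0]) [] =
      pvE v d.toNat i.toNat := by
  rw [pv_foldl_append_map, List.nil_append, PySem.List.pyRange_one]
  apply List.ext_getElem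
  · simp only [List.length_map, List.length_range, pvE, List.length_set,
      List.length_replicate]
    omega
  · intro k h1 h2
    simp only [List.length_map, List.length_range] at h1
    simp only [List.getElem_map, List.getElem_range, pvE, List.getElem_set,
      List.getElem_replicate, zero_add]
    by_cases hk : i.toNat = k
    · have hb : (i == (k : Int)) = true := by simp; omega
      simp [hb, hk]
    · have hb : (i == (k : Int)) = false := by simp; omega
      simp [hb, hk]

-- A's outer loop keeps its second component [] and accumulates the rows
theorem pv_outer (v d : Int) (l : List Int) (c : List (List Int)) :
    (l.foldl
      (fun (st : List (List Int) × List Int) i =>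
        let cov_i := (PySem.List.pyRange 0 d 1).foldl
          (fun acc j => acc ++ [if i == j then v else 0]) st.2
        (st.1 ++ [cov_i], []))
      (c, [])).1 =
    c ++ l.map (fun i =>
      (PySem.List.pyRange 0 d 1).foldl (fun acc j => acc ++ [if i == j then v else 0]) []) := by
  induction l generalizing c with
  | nil => simp
  | cons a t ih => simp only [List.foldl_cons, List.map_cons]; rw [ih]; simp

-- ===== VERDICT (by name: the statement is the Claim_ definition above) =====
theorem generarCovarianzas_spec : Claim_equal_generarCovarianzas := by
  intro v d _
  unfold Spec_generarCovarianzas generarCovarianzas generarCovarianzas_alt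
  by_cases hd : d ≤ 0
  · rw [if_pos hd, PySem.List.pyRange_one_eq_nil hd]
    rfl
  · rw [if_neg hd, pv_outer, List.nil_append, pv_foldB, List.nil_append,
      PySem.List.length_pyRange_one]
    have hn : d.toNat = (d - 1).toNat + 1 := by omega
    have hrow0 : (v :: List.replicate (d - 1).toNat 0) = pvE v d.toNat 0 := by
      rw [pvE, hn, List.replicate_succ, List.set_cons_zero]
    have hd0 : d - (0 : Int) = d := by ring
    rw [hrow0]
    have hA : (PySem.List.pyRange 0 d 1).map (fun i =>
        (PySem.List.pyRange 0 d 1).foldl (fun acc j => acc ++ [if i == j then v else 0]) []) =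
        (PySem.List.pyRange 0 d 1).map (fun i => pvE v d.toNat i.toNat) := by
      apply List.map_congr_left
      intro i hi
      rw [PySem.List.mem_pyRange_one] at hi
      exact pv_row_eq v d i hi.1 hi.2
    rw [hA, PySem.List.pyRange_one, List.map_map, hd0]
    apply List.map_congr_left
    intro k hk
    rw [List.mem_range] at hk
    simp only [Function.comp_apply]
    rw [pv_iter_e v d.toNat k hk]
    congr 1
    omega
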